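-- pv_equiv track=rewrite | github.com/ai-kmu/etc | algorithm/2020/0313/roje.py | solution
-- ===== SOURCE A (Python) =====
-- def solution(progresses, speeds):
--     iters = len(progresses)
--     answer = {}
--     days = []
--
--     for idx in range(iters):
--         total = progresses[idx]
--         day = 0
--         while True:
--             day += 1
--             if (total + speeds[idx] * day) >= 100:
--                 days.append(day)
--                 break
--
--     for idx in range(iters-1):
--         if days[idx] >= days[idx+1]:
--             days[idx+1] = days[idx]
--
--     for d in days:
--         try: answer[d] += 1
--         except: answer[d] = 1
--
--
--     return list(answer.values())
-- ===== SOURCE B (Python) =====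
-- def solution(progresses, speeds):
--     days = [_finish(p, s) for p, s in zip(progresses, speeds)]
--     if not days:
--         return []
--     result = []
--     deadline = days[0]
--     count = 0
--     for d in days:
--         if d <= deadline:
--             count += 1
--         else:
--             result.append(count)
--             deadline = d
--             count = 1
--     result.append(count)
--     return result
--
--
-- def _finish(p, s):
--     if s <= 0:
--         return 1
--     return max(1, -((p - 100) // s))
-- ===== Notes on version B (the rewrite author's own statement) =====
-- stated objective: simpler
-- what changed: Replaces A's per-task while-loop day search, in-place max-propagation pass and dict frequency count by a ceiling-division finish-day formula and a single grouping fold that carries (deadline, count, result).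
import Mathlib
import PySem

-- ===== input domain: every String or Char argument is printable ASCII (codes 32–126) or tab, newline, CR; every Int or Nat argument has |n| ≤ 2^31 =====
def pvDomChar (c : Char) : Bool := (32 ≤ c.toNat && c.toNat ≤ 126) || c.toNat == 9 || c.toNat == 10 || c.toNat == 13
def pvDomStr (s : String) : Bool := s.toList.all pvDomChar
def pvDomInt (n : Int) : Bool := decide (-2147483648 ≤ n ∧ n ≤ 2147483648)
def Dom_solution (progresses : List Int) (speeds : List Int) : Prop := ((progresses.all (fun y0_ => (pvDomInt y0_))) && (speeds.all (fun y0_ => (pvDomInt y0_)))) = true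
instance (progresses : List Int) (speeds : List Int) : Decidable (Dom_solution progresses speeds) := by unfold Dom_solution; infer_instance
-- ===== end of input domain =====

-- B replaces A's three passes (per-task while-loop day search, in-place max propagation over
-- the array, dict frequency count) by a ceiling-division day formula and one grouping fold.

-- ===== PORT A =====
-- the 'while True: day += 1; if total + speeds[idx]*day >= 100: …' loop; fuel makes it total
-- (fuel (100 - total).toNat + 1 is enough whenever the Python loop terminates, see loopA_finds)
def loopA : Nat → Int → Int → Int → Int
  | 0, _, _, day => day
  | fuel+1, total, speed, day =>
    if total + speed * (day + 1) ≥ 100 then day + 1 else loopA fuel total speed (day + 1)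

def dayOfA (total speed : Int) : Int := loopA ((100 - total).toNat + 1) total speed 0

-- body of 'for idx in range(iters-1): if days[idx] >= days[idx+1]: days[idx+1] = days[idx]'
def propStepA (ds : List Int) (idx : Int) : List Int :=
  if PySem.List.pyGetD ds idx 0 ≥ PySem.List.pyGetD ds (idx + 1) 0
  then PySem.List.pySetD ds (idx + 1) (PySem.List.pyGetD ds idx 0) else ds

-- body of 'try: answer[d] += 1 / except: answer[d] = 1'
def cntStepA (d : PySem.Dict Int Int) (v : Int) : PySem.Dict Int Int :=
  d.insert v (d.getD v 0 + 1)

def solution (progresses : List Int) (speeds : List Int) : List Int :=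
  let iters : Int := PySem.List.len progresses
  let days := (PySem.List.pyRange 0 iters).foldl
    (fun ds idx => ds ++ [dayOfA (PySem.List.pyGetD progresses idx 0) (PySem.List.pyGetD speeds idx 0)]) []
  let days2 := (PySem.List.pyRange 0 (iters - 1)).foldl propStepA days
  let answer := days2.foldl cntStepA PySem.Dict.empty
  answer.values

-- ===== PORT B =====
def finishB (p s : Int) : Int := if s ≤ 0 then 1 else max 1 (-(PySem.Int.floordiv (p - 100) s))

-- body of B's grouping loop; state = (deadline, count, result)
def groupStepB (st : Int × Int × List Int) (d : Int) : Int × Int × List Int :=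
  if d ≤ st.1 then (st.1, st.2.1 + 1, st.2.2) else (d, 1, st.2.2 ++ [st.2.1])

def solution_alt (progresses : List Int) (speeds : List Int) : List Int :=
  let days := (progresses.zip speeds).map (fun pr => finishB pr.1 pr.2)
  match days with
  | [] => []
  | d0 :: _ =>
    let st := days.foldl groupStepB (d0, 0, [])
    st.2.2 ++ [st.2.1]

-- ===== PRECONDITION & SPEC =====
-- Pre_ excludes exactly the inputs on which the Python A does not return: speeds shorter than
-- progresses (IndexError on speeds[idx]) and any task with speed <= 0 that is not already done
-- after one day (the 'while True' loop never terminates).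
def Pre_solution (progresses : List Int) (speeds : List Int) : Prop :=
  progresses.length ≤ speeds.length ∧
    ∀ pr ∈ progresses.zip speeds, 0 < pr.2 ∨ 100 ≤ pr.1 + pr.2
instance (progresses : List Int) (speeds : List Int) : Decidable (Pre_solution progresses speeds) := by
  unfold Pre_solution; infer_instance

def pvWitness_solution : List Int × List Int := ([93, 30, 55], [1, 30, 5])

def Spec_solution (progresses : List Int) (speeds : List Int) (out : List Int) : Prop := out = solution_alt progresses speeds
instance (progresses : List Int) (speeds : List Int) (out : List Int) : Decidable (Spec_solution progresses speeds out) := by unfold Spec_solution; infer_instance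

-- ===== CLAIM (what is proved, stated in full; the proofs are below) =====
def Claim_equal_solution : Prop := ∀ (progresses : List Int) (speeds : List Int), Dom_solution progresses speeds → Pre_solution progresses speeds → Spec_solution progresses speeds (solution progresses speeds)

-- ===== LEMMAS AND PROOFS =====

-- running-max rewrite of A's propagated days list
def runMax (m : Int) : List Int → List Int
  | [] => []
  | d :: ds => max m d :: runMax (max m d) ds

-- the while loop returns tgt when tgt is the least day > day satisfying the goal and fuel suffices
theorem loopA_finds (fuel : Nat) (t s day tgt : Int) (hs : 1 ≤ s) (h1 : day < tgt)
    (h2 : 100 ≤ t + s * tgt) (h3 : tgt = day + 1 ∨ t + s * (tgt - 1) < 100)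
    (hfuel : tgt - day ≤ (fuel : Int)) : loopA fuel t s day = tgt := by
  induction fuel generalizing day with
  | zero => simp at hfuel; omega
  | succ n ih =>
    simp only [loopA]
    by_cases hc : 100 ≤ t + s * (day + 1)
    · rw [if_pos hc]
      rcases h3 with h3 | h3
      · omega
      · by_contra hne
        have hle : day + 1 ≤ tgt - 1 := by omega
        nlinarith [mul_le_mul_of_nonneg_left hle (by omega : (0:ℤ) ≤ s)]
    · rw [if_neg (by omega)]
      have hlt : day + 1 < tgt := by
        by_contra hh
        have he : tgt = day + 1 := by omega
        rw [he] at h2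
        omega
      have h3' : tgt = (day + 1) + 1 ∨ t + s * (tgt - 1) < 100 := by
        rcases h3 with h3 | h3
        · omega
        · exact Or.inr h3
      exact ih (day + 1) hlt h3' (by push_cast at hfuel; omega)

theorem dayOfA_eq_finishB (p s : Int) (h : 0 < s ∨ 100 ≤ p + s) : dayOfA p s = finishB p s := by
  by_cases hs : s ≤ 0
  · have hps : 100 ≤ p + s := by
      rcases h with h | h
      · omega
      · exact h
    unfold dayOfA finishB
    rw [if_pos hs]
    simp only [loopA]
    rw [if_pos (by rw [show (0:Int) + 1 = 1 by ring, mul_one]; exact hps)]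
    omega
  · have hs' : 0 < s := by omega
    set q := -(PySem.Int.floordiv (p - 100) s) with hq
    have hb : (q - 1) * s < 100 - p ∧ 100 - p ≤ q * s := by
      apply (PySem.Int.neg_floordiv_neg_eq_iff_of_pos hs').mp
      rw [hq, show -(100 - p) = p - 100 by ring]
    unfold finishB
    rw [if_neg hs]
    unfold dayOfA
    apply loopA_finds _ _ _ _ _ (by omega) (by omega)
    · nlinarith [mul_le_mul_of_nonneg_left (le_max_right 1 q) (le_of_lt hs'), hb.2]
    · rcases (show q ≤ 1 ∨ 1 < q by omega) with hq1 | hq1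
      · left; omega
      · right
        have hmax : max 1 q = q := by omega
        rw [hmax]
        nlinarith [hb.1]
    · rcases (show q ≤ 1 ∨ 1 < q by omega) with hq1 | hq1
      · push_cast; omega
      · have h1 : q - 1 ≤ (q - 1) * s := by nlinarith
        have h2 := hb.1
        push_cast
        omega

-- stage 1: the index-driven day loop builds the zip-map days list
theorem stage1 (ps ss : List Int) (h : ps.length ≤ ss.length) :
    (List.range ps.length).map
        (fun i => dayOfA (ps.getD i 0) (ss.getD i 0)) =
      (ps.zip ss).map (fun pr => dayOfA pr.1 pr.2) := by
  induction ps generalizing ss with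
  | nil => simp
  | cons p ps ih =>
    cases ss with
    | nil => simp at h
    | cons s ss =>
      simp only [List.length_cons, List.range_succ_eq_map, List.map_cons, List.map_map,
        List.zip_cons_cons]
      congr 1
      rw [← ih ss (by simpa using h)]
      apply List.map_congr_left
      intro i _
      simp

-- stage 2: the in-place propagation loop computes the running maximum
theorem stage2 (rest : List Int) : ∀ (pref : List Int) (m : Int) (N : Int),
    N = ((pref.length + 1 + rest.length : Nat) : Int) →
    (PySem.List.pyRange (pref.length : Int) (N - 1)).foldl propStepA (pref ++ m :: rest)
      = pref ++ m :: runMax m rest := by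
  induction rest with
  | nil =>
    intro pref m N hN
    rw [PySem.List.pyRange_one_eq_nil (by simp at hN; omega)]
    simp [runMax]
  | cons r rest ih =>
    intro pref m N hN
    rw [PySem.List.pyRange_one_cons (by simp at hN; omega)]
    simp only [List.foldl_cons]
    have g1 : (pref ++ m :: r :: rest).getD pref.length 0 = m := by
      rw [List.getD_append_right _ _ _ _ (le_refl _)]
      simp
    have g2 : (pref ++ m :: r :: rest).getD (pref.length + 1) 0 = r := by
      rw [List.getD_append_right _ _ _ _ (by omega)]
      simp
    have hstep : propStepA (pref ++ m :: r :: rest) (pref.length : Int)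
        = (pref ++ [m]) ++ (max m r) :: rest := by
      unfold propStepA
      rw [show ((pref.length : Int) + 1) = ((pref.length + 1 : Nat) : Int) by push_cast; ring]
      rw [PySem.List.pyGetD_natCast, PySem.List.pyGetD_natCast, PySem.List.pySetD_natCast]
      rw [g1, g2]
      by_cases hmr : m ≥ r
      · rw [if_pos hmr, List.set_append, if_neg (by omega)]
        rw [max_eq_left (by omega)]
        simp
      · rw [if_neg hmr, max_eq_right (by omega)]
        simp
    rw [hstep]
    have hih := ih (pref ++ [m]) (max m r) N
      (by push_cast at hN ⊢; simp at hN ⊢; omega)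
    rw [show (((pref ++ [m]).length : Nat) : Int) = ((pref.length : Int) + 1) by simp] at hih
    rw [hih]
    simp [runMax]

-- first lookup in an association list whose keys all differ from k
theorem get?_mk_absent (l : List (Int × Int)) (k : Int) (h : ∀ p ∈ l, p.1 ≠ k) :
    (PySem.Dict.mk l).get? k = none := by
  induction l with
  | nil => rfl
  | cons p l ih =>
    obtain ⟨a, b⟩ := p
    rw [PySem.Dict.get?_mk_cons, if_neg (by simpa using h (a, b) (by simp))]
    exact ih fun q hq => h q (List.mem_cons_of_mem _ hq)

theorem get?_mk_last (pre : List (Int × Int)) (m c : Int) (h : ∀ p ∈ pre, p.1 ≠ m) :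
    (PySem.Dict.mk (pre ++ [(m, c)])).get? m = some c := by
  induction pre with
  | nil => simp [PySem.Dict.get?_mk_cons]
  | cons p pre ih =>
    obtain ⟨a, b⟩ := p
    rw [List.cons_append, PySem.Dict.get?_mk_cons, if_neg (by simpa using h (a, b) (by simp))]
    exact ih fun q hq => h q (List.mem_cons_of_mem _ hq)

-- stage 3: counting frequencies of the (non-decreasing) running-max list equals B's
-- one-pass grouping fold
theorem stage3 (rest : List Int) : ∀ (pre : List (Int × Int)) (m c : Int),
    (∀ p ∈ pre, p.1 < m) →
    ((runMax m rest).foldl cntStepA (PySem.Dict.mk (pre ++ [(m, c)]))).values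
      = ((rest.foldl groupStepB (m, c, pre.map Prod.snd)).2.2
          ++ [(rest.foldl groupStepB (m, c, pre.map Prod.snd)).2.1]) := by
  induction rest with
  | nil =>
    intro pre m c hlt
    simp [runMax, PySem.Dict.values_mk]
  | cons r rest ih =>
    intro pre m c hlt
    simp only [runMax, List.foldl_cons]
    by_cases hrm : r ≤ m
    · rw [max_eq_left hrm]
      have hne : ∀ p ∈ pre, p.1 ≠ m := fun p hp => ne_of_lt (hlt p hp)
      have hget : (PySem.Dict.mk (pre ++ [(m, c)])).getD m 0 = c := by
        rw [PySem.Dict.getD_eq_get?_getD, get?_mk_last pre m c hne]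
        rfl
      have hcont : (PySem.Dict.mk (pre ++ [(m, c)])).contains m = true := by
        rw [PySem.Dict.contains_mk]
        exact List.any_eq_true.mpr ⟨(m, c), by simp, by simp⟩
      have hins : cntStepA (PySem.Dict.mk (pre ++ [(m, c)])) m
          = PySem.Dict.mk (pre ++ [(m, c + 1)]) := by
        unfold cntStepA
        rw [hget]
        apply PySem.Dict.ext
        rw [PySem.Dict.items_insert, if_pos hcont]
        show List.map _ (pre ++ [(m, c)]) = pre ++ [(m, c + 1)]
        rw [List.map_append]
        congr 1
        · calc List.map _ pre = List.map id pre := by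
                apply List.map_congr_left
                intro p hp
                have hb : (p.1 == m) = false := by simpa using hne p hp
                simp [hb]
             _ = pre := List.map_id pre
        · simp
      rw [hins, ih pre m (c + 1) hlt]
      simp [groupStepB, hrm]
    · rw [max_eq_right (by omega)]
      have hne : ∀ p ∈ pre ++ [(m, c)], p.1 ≠ r := by
        intro p hp
        rcases List.mem_append.mp hp with hp | hp
        · exact ne_of_lt (lt_trans (hlt p hp) (by omega))
        · simp at hp
          rw [hp]
          simp
          omega
      have hget : (PySem.Dict.mk (pre ++ [(m, c)])).getD r 0 = 0 := by
        rw [PySem.Dict.getD_eq_get?_getD, get?_mk_absent _ r hne]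
        rfl
      have hcont : (PySem.Dict.mk (pre ++ [(m, c)])).contains r = false := by
        rw [PySem.Dict.contains_mk]
        refine List.any_eq_false.mpr ?_
        intro p hp
        simpa using hne p hp
      have hins : cntStepA (PySem.Dict.mk (pre ++ [(m, c)])) r
          = PySem.Dict.mk ((pre ++ [(m, c)]) ++ [(r, 1)]) := by
        unfold cntStepA
        rw [hget]
        apply PySem.Dict.ext
        rw [PySem.Dict.items_insert, if_neg (by simp [hcont])]
        show (pre ++ [(m, c)]) ++ [(r, 0 + 1)] = (pre ++ [(m, c)]) ++ [(r, 1)]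
        norm_num
      have hlt' : ∀ p ∈ pre ++ [(m, c)], p.1 < r := by
        intro p hp
        rcases List.mem_append.mp hp with hp | hp
        · exact lt_trans (hlt p hp) (by omega)
        · simp at hp
          rw [hp]
          simp
          omega
      rw [hins, ih (pre ++ [(m, c)]) r 1 hlt']
      simp [groupStepB, hrm]

-- ===== VERDICT (by name: the statement is the Claim_ definition above) =====
theorem solution_spec : Claim_equal_solution := by
  intro ps ss _ hpre
  obtain ⟨hlen, hterm⟩ := hpre
  unfold Spec_solution solution solution_alt
  simp only [PySem.List.len_eq]
  rw [PySem.List.foldl_append_singleton_eq_map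
    (fun idx => dayOfA (PySem.List.pyGetD ps idx 0) (PySem.List.pyGetD ss idx 0)),
    List.nil_append, PySem.List.pyRange_zero_nat ps.length, List.map_map]
  have hmap1 : ((fun idx => dayOfA (PySem.List.pyGetD ps idx 0) (PySem.List.pyGetD ss idx 0))
        ∘ (fun (k : Nat) => (k : Int))) = fun (i : Nat) => dayOfA (ps.getD i 0) (ss.getD i 0) := by
    funext i
    simp
  rw [hmap1, stage1 ps ss hlen]
  rw [List.map_congr_left (g := fun pr : Int × Int => finishB pr.1 pr.2)
    (fun pr hpr => dayOfA_eq_finishB pr.1 pr.2 (hterm pr hpr))]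
  cases hL : (ps.zip ss).map (fun pr : Int × Int => finishB pr.1 pr.2) with
  | nil =>
    have hps : ps.length = 0 := by
      have h0 := congrArg List.length hL
      rw [List.length_map, List.length_zip, List.length_nil] at h0
      omega
    rw [hps]
    rw [PySem.List.pyRange_one_eq_nil (by norm_num)]
    simp
    rfl
  | cons d rest =>
    have hlen2 : ps.length = rest.length + 1 := by
      have h0 := congrArg List.length hL
      rw [List.length_map, List.length_zip, List.length_cons] at h0
      omega
    have h2 := stage2 rest [] d (ps.length : Int)
      (by simp; omega)
    simp only [List.length_nil, Nat.cast_zero, List.nil_append] at h2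
    rw [h2]
    simp only [List.foldl_cons]
    have hfirst : cntStepA (PySem.Dict.empty) d = PySem.Dict.mk ([] ++ [(d, 1)]) := by
      unfold cntStepA
      apply PySem.Dict.ext
      rw [PySem.Dict.items_insert, if_neg (by simp)]
      simp [show (PySem.Dict.empty : PySem.Dict Int Int).items = [] from rfl]
    rw [hfirst, stage3 rest [] d 1 (by simp)]
    have hg : groupStepB (d, 0, []) d = (d, 1, ([] : List Int)) := by
      unfold groupStepB
      simp
    rw [hg]
    simp
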